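-- pv_equiv track=rewrite | github.com/hyunjikeem/python_Algorithm | 프로그래머스/0/181935. 홀짝에 따라 다른 값 반환하기/홀짝에 따라 다른 값 반환하기.py | solution
-- ===== SOURCE A (Python) =====
-- def solution(n):
--     arr = []
--     if n % 2 == 0:
--         arr = [i * i for i in range(1, n+1) if i % 2 == 0]
--         return sum(arr)
--     else:
--         arr = [i for i in range(1, n+1) if i % 2 != 0]
--         return sum(arr)
-- ===== SOURCE B (Python) =====
-- def solution(n):
--     if n % 2 == 0:
--         m = max(n // 2, 0)
--         return 2 * m * (m + 1) * (2 * m + 1) // 3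
--     else:
--         k = max((n + 1) // 2, 0)
--         return k * k
-- ===== Notes on version B (the rewrite author's own statement) =====
-- stated objective: faster
-- what changed: Replaced the O(n) list-comprehension sums with constant-time closed-form summation formulas for the even-square sum and the odd sum.
import Mathlib
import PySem

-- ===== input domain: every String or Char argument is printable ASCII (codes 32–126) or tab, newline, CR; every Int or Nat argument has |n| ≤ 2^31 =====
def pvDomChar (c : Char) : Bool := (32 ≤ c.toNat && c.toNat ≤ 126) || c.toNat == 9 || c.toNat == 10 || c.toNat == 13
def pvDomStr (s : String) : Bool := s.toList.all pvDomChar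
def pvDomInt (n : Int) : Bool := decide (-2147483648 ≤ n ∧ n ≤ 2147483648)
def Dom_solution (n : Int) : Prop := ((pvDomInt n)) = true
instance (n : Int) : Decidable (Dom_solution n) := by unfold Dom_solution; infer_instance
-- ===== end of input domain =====

-- B replaces A's range-comprehension sums by closed-form formulas (objective: faster).

-- ===== PORT A =====
-- arr = [i * i for i in range(1, n+1) if i % 2 == 0]
def solutionArrEven (n : Int) : List Int :=
  ((PySem.List.pyRange 1 (n + 1) 1).filter (fun i => i % 2 == 0)).map (fun i => i * i)
-- arr = [i for i in range(1, n+1) if i % 2 != 0]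
def solutionArrOdd (n : Int) : List Int :=
  (PySem.List.pyRange 1 (n + 1) 1).filter (fun i => i % 2 != 0)

def solution (n : Int) : Int :=
  if n % 2 == 0 then (solutionArrEven n).sum else (solutionArrOdd n).sum

-- ===== PORT B =====
def solution_alt (n : Int) : Int :=
  if n % 2 == 0 then
    PySem.Int.floordiv
      (2 * max (PySem.Int.floordiv n 2) 0 * (max (PySem.Int.floordiv n 2) 0 + 1)
        * (2 * max (PySem.Int.floordiv n 2) 0 + 1)) 3
  else
    max (PySem.Int.floordiv (n + 1) 2) 0 * max (PySem.Int.floordiv (n + 1) 2) 0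

-- ===== PRECONDITION & SPEC =====
def Spec_solution (n : Int) (out : Int) : Prop := out = solution_alt n
instance (n : Int) (out : Int) : Decidable (Spec_solution n out) := by unfold Spec_solution; infer_instance

-- ===== CLAIM (what is proved, stated in full; the proofs are below) =====
def Claim_equal_solution : Prop := ∀ (n : Int), Dom_solution n → Spec_solution n (solution n)

-- ===== LEMMAS AND PROOFS =====

theorem pvMain (k : Nat) :
    3 * (solutionArrEven k).sum
        = 2 * ((k : Int) / 2) * ((k : Int) / 2 + 1) * (2 * ((k : Int) / 2) + 1) ∧
    (solutionArrOdd k).sum = (((k : Int) + 1) / 2) * (((k : Int) + 1) / 2) := by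
  induction k with
  | zero =>
      constructor <;>
        simp [solutionArrEven, solutionArrOdd,
          PySem.List.pyRange_one_eq_nil (by norm_num : (1:Int) ≥ 1)]
  | succ k ih =>
      obtain ⟨ih1, ih2⟩ := ih
      unfold solutionArrEven at ih1 ⊢
      unfold solutionArrOdd at ih2 ⊢
      have hsplit : PySem.List.pyRange 1 ((k : Int) + 1 + 1) 1
          = PySem.List.pyRange 1 ((k : Int) + 1) 1 ++ [(k : Int) + 1] :=
        PySem.List.pyRange_one_succ_right (by omega)
      push_cast at ih1 ih2 ⊢
      rw [hsplit]
      simp only [List.filter_append, List.map_append, List.sum_append]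
      rcases Nat.even_or_odd k with ⟨j, hj⟩ | ⟨j, hj⟩
      · -- k = j + j : new element is odd
        have hE : List.filter (fun i : Int => i % 2 == 0) [(k : Int) + 1] = [] := by
          rw [List.filter_cons_of_neg (by simp only [beq_iff_eq]; omega)]; rfl
        have hO : List.filter (fun i : Int => i % 2 != 0) [(k : Int) + 1]
            = [(k : Int) + 1] := by
          rw [List.filter_cons_of_pos (by simp only [bne_iff_ne, ne_eq]; omega)]; rfl
        have d1 : ((k : Int)) / 2 = (j : Int) := by omega
        have d2 : ((k : Int) + 1) / 2 = (j : Int) := by omega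
        have d3 : ((k : Int) + 1 + 1) / 2 = (j : Int) + 1 := by omega
        rw [d1] at ih1; rw [d2] at ih2
        constructor
        · rw [hE, d2]; simp only [List.map_nil, List.sum_nil]
          linear_combination ih1
        · rw [hO, d3]; simp only [List.sum_cons, List.sum_nil]
          have hk : (k : Int) = (j : Int) + (j : Int) := by omega
          linear_combination ih2 + hk
      · -- k = 2j + 1 : new element is even
        have hE : List.filter (fun i : Int => i % 2 == 0) [(k : Int) + 1]
            = [(k : Int) + 1] := by
          rw [List.filter_cons_of_pos (by simp only [beq_iff_eq]; omega)]; rfl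
        have hO : List.filter (fun i : Int => i % 2 != 0) [(k : Int) + 1] = [] := by
          rw [List.filter_cons_of_neg (by simp only [bne_iff_ne, ne_eq, not_not]; omega)]; rfl
        have d1 : ((k : Int)) / 2 = (j : Int) := by omega
        have d2 : ((k : Int) + 1) / 2 = (j : Int) + 1 := by omega
        have d3 : ((k : Int) + 1 + 1) / 2 = (j : Int) + 1 := by omega
        rw [d1] at ih1; rw [d2] at ih2
        constructor
        · rw [hE, d2]; simp only [List.map_cons, List.map_nil, List.sum_cons, List.sum_nil]
          have hk : (k : Int) = 2 * (j : Int) + 1 := by omega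
          linear_combination ih1 + 3*((k:Int) + 2*(j:Int) + 3)*hk
        · rw [hO, d3]; simp only [List.sum_nil, add_zero]
          exact ih2
-- ===== VERDICT (by name: the statement is the Claim_ definition above) =====
theorem solution_spec : Claim_equal_solution := by
  intro n _
  unfold Spec_solution solution solution_alt
  by_cases hn : 0 ≤ n
  · obtain ⟨k, rfl⟩ := Int.eq_ofNat_of_zero_le hn
    obtain ⟨h1, h2⟩ := pvMain k
    rw [PySem.Int.floordiv_eq_ediv_of_pos (a := (k : Int)) (by norm_num),
        PySem.Int.floordiv_eq_ediv_of_pos (a := (k : Int) + 1) (by norm_num)]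
    have hm : max ((k : Int) / 2) 0 = (k : Int) / 2 := by omega
    have hk : max (((k : Int) + 1) / 2) 0 = ((k : Int) + 1) / 2 := by omega
    rw [hm, hk]
    split
    · rw [PySem.Int.floordiv_eq_ediv_of_pos (by norm_num)]
      omega
    · exact h2
  · have hnil : PySem.List.pyRange 1 (n + 1) 1 = [] :=
      PySem.List.pyRange_one_eq_nil (by omega)
    have hm : max (PySem.Int.floordiv n 2) 0 = 0 := by
      have := PySem.Int.floordiv_eq_ediv_of_pos (a := n) (b := 2) (by norm_num)
      omega
    have hk : max (PySem.Int.floordiv (n + 1) 2) 0 = 0 := by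
      have := PySem.Int.floordiv_eq_ediv_of_pos (a := n + 1) (b := 2) (by norm_num)
      omega
    unfold solutionArrEven solutionArrOdd
    rw [hnil, hm, hk]
    split
    · simp only [List.filter_nil, List.map_nil, List.sum_nil]; decide
    · simp only [List.filter_nil, List.sum_nil]; decide
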